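-- pv_equiv track=rewrite | github.com/MinKyeom/KMK-DREAM | Programmers/Lv0/문자열 묶기.py | solution
-- ===== SOURCE A (Python) =====
-- def solution(strArr):
--     num = []
--     result = []
--     for x in range(len(strArr)):
--         num.append(len(strArr[x]))
--
--     for k in range(31):
--         s = num.count(k)
--         result.append(s)
--
--     return max(result)
-- ===== SOURCE B (Python) =====
-- def solution(strArr):
--     lens = [len(s) for s in strArr if len(s) <= 30]
--     best = 0
--     while lens:
--         k = lens[0]
--         rest = [x for x in lens if x != k]
--         best = max(best, len(lens) - len(rest))
--         lens = rest
--     return best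
-- ===== Notes on version B (the rewrite author's own statement) =====
-- stated objective: faster
-- what changed: Replaces A's probe-every-bucket approach (31 .count scans over the length list) by a successive-partition mode search: repeatedly split the (<=30-filtered) length list on its first value, take that group's size as a candidate, and continue on the remainder, so only lengths actually present are examined.
import Mathlib
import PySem

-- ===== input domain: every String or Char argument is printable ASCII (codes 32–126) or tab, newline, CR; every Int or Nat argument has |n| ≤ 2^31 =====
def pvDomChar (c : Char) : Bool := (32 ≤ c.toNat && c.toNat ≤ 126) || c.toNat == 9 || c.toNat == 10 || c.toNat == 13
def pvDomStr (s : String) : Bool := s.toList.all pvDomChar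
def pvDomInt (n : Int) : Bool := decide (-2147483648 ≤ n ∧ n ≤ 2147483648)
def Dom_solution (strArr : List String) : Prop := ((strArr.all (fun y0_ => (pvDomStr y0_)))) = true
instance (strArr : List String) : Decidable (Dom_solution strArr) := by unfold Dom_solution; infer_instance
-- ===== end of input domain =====

-- B: successive-partition mode search — repeatedly split the (≤30-filtered) length list on its
-- first value and keep the largest group size, instead of A's 31 .count probes (objective: alternative).

-- ===== PORT A =====
def solution (strArr : List String) : Int :=
  let num : List Int := (PySem.List.pyRange 0 (PySem.List.len strArr)).foldl
    (fun acc x => acc ++ [PySem.Str.len (PySem.List.pyGetD strArr x "")]) []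
  let result : List Int := (PySem.List.pyRange 0 31).foldl
    (fun acc k => acc ++ [(PySem.List.count num k : Int)]) []
  PySem.List.maxD result (fun v => v) 0

-- ===== PORT B =====
-- the while loop of Source B: partition on the first value, keep the bigger of best and the group size
def bLoop : List Int → Int → Int
  | [], best => best
  | k :: t, best =>
      let rest := (k :: t).filter (fun x => x != k)
      bLoop rest (max best (((k :: t).length : Int) - rest.length))
termination_by l _ => l.length
decreasing_by
  simp only [List.filter_cons, bne_self_eq_false, List.length_cons]
  exact Nat.lt_succ_of_le (List.length_filter_le _ _)

def solution_alt (strArr : List String) : Int :=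
  let lens : List Int :=
    (strArr.filter (fun s => decide (PySem.Str.len s ≤ 30))).map PySem.Str.len
  bLoop lens 0

-- ===== PRECONDITION & SPEC =====
def Spec_solution (strArr : List String) (out : Int) : Prop := out = solution_alt strArr
instance (strArr : List String) (out : Int) : Decidable (Spec_solution strArr out) := by unfold Spec_solution; infer_instance

-- ===== CLAIM (what is proved, stated in full; the proofs are below) =====
def Claim_equal_solution : Prop := ∀ (strArr : List String), Dom_solution strArr → Spec_solution strArr (solution strArr)

-- ===== LEMMAS AND PROOFS =====

theorem pv_maxD_cases (xs : List Int) :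
    PySem.List.maxD xs (fun v => v) 0 = 0 ∨ PySem.List.maxD xs (fun v => v) 0 ∈ xs := by
  unfold PySem.List.maxD
  cases h : PySem.List.max? xs (fun v => v) with
  | none => left; rfl
  | some m => right; simpa using PySem.List.max?_mem h

theorem pv_le_maxD (xs : List Int) (x : Int) (hx : x ∈ xs) :
    x ≤ PySem.List.maxD xs (fun v => v) 0 := by
  unfold PySem.List.maxD
  cases h : PySem.List.max? xs (fun v => v) with
  | none =>
      rw [PySem.List.max?_eq_none_iff] at h
      subst h; simp at hx
  | some m => simpa using PySem.List.max?_isMax h x hx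

theorem pv_maxD_nonneg (xs : List Int) (h : ∀ x ∈ xs, 0 ≤ x) :
    0 ≤ PySem.List.maxD xs (fun v => v) 0 := by
  rcases pv_maxD_cases xs with h0 | hm
  · omega
  · exact h _ hm

-- the group split off by bLoop has size count k
theorem pv_group_size (k : Int) (xs : List Int) :
    ((xs.length : Int)) - (xs.filter (fun x => x != k)).length = (xs.count k : Int) := by
  induction xs with
  | nil => simp
  | cons x t ih =>
      by_cases h : x = k
      · subst h
        simp only [List.filter_cons, bne_self_eq_false, List.length_cons, List.count_cons_self]
        push_cast at ih ⊢
        omega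
      · have hb : (x != k) = true := by simpa using h
        have hcc : List.count k (x :: t) = List.count k t := by
          simp [List.count_cons]
          exact h
        simp only [List.filter_cons, hb, if_true, List.length_cons, hcc]
        push_cast at ih ⊢
        omega

-- bLoop never goes below its accumulator
theorem pv_bLoop_ge (xs : List Int) (best : Int) : best ≤ bLoop xs best := by
  induction xs, best using bLoop.induct with
  | case1 best => simp [bLoop]
  | case2 k t best rest ih =>
      rw [bLoop]
      exact le_trans (le_max_left _ _) ih

-- every value's count is dominated by bLoop's result
theorem pv_count_le_bLoop (xs : List Int) (best : Int) (j : Int) :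
    j ∈ xs → (xs.count j : Int) ≤ bLoop xs best := by
  induction xs, best using bLoop.induct with
  | case1 best => intro hj; simp at hj
  | case2 k t best rest ih =>
      intro hj
      rw [bLoop]
      by_cases hjk : j = k
      · subst hjk
        have h1 : ((List.count j (j :: t) : Nat) : Int)
            = ((j :: t).length : Int) - ((j :: t).filter (fun x => x != j)).length :=
          (pv_group_size j (j :: t)).symm
        calc ((List.count j (j :: t) : Nat) : Int)
            ≤ max best (((j :: t).length : Int) - ((j :: t).filter (fun x => x != j)).length) := by
              rw [h1]; exact le_max_right _ _
          _ ≤ bLoop ((j :: t).filter (fun x => x != j)) _ := pv_bLoop_ge _ _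
      · have hjr : j ∈ (k :: t).filter (fun x => x != k) := by
          simp only [List.mem_filter]
          exact ⟨hj, by simpa using hjk⟩
        have hcnt : List.count j ((k :: t).filter (fun x => x != k)) = List.count j (k :: t) :=
          List.count_filter (by simpa using hjk)
        have := ih hjr
        rw [hcnt] at this
        exact this

-- bLoop's result is the accumulator or some value's count
theorem pv_bLoop_cases (xs : List Int) (best : Int) :
    bLoop xs best = best ∨ ∃ j ∈ xs, bLoop xs best = (xs.count j : Int) := by
  induction xs, best using bLoop.induct with
  | case1 best => left; rw [bLoop]
  | case2 k t best rest ih =>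
      rw [bLoop]
      rcases ih with h0 | ⟨j, hj, hje⟩
      · rw [h0]
        rcases le_total best (((k :: t).length : Int) - ((k :: t).filter (fun x => x != k)).length)
          with hle | hle
        · right
          exact ⟨k, List.mem_cons_self, by rw [max_eq_right hle]; exact pv_group_size k (k :: t)⟩
        · left; exact max_eq_left hle
      · right
        have hjk : j ≠ k := by
          rcases List.mem_filter.mp hj with ⟨_, hb⟩
          simpa using hb
        have hjm : j ∈ k :: t := (List.mem_filter.mp hj).1
        have hcnt : List.count j ((k :: t).filter (fun x => x != k)) = List.count j (k :: t) :=
          List.count_filter (by simpa using hjk)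
        exact ⟨j, hjm, by rw [hje, hcnt]⟩

theorem pv_bLoop_nonneg (xs : List Int) : 0 ≤ bLoop xs 0 := by
  rcases pv_bLoop_cases xs 0 with h | ⟨j, _, hje⟩
  · omega
  · rw [hje]; positivity

theorem solution_spec : Claim_equal_solution := by
  intro strArr _
  unfold Spec_solution
  simp only [solution, solution_alt]
  set lens : List Int := strArr.map PySem.Str.len with hlens
  set fl : List Int :=
    (strArr.filter (fun s => decide (PySem.Str.len s ≤ 30))).map PySem.Str.len with hfl
  -- A's num is lens
  have hnum : (PySem.List.pyRange 0 (PySem.List.len strArr)).foldl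
      (fun acc x => acc ++ [PySem.Str.len (PySem.List.pyGetD strArr x "")]) [] = lens := by
    rw [PySem.List.foldl_append_singleton_eq_map]
    have := PySem.List.map_pyGetD_pyRange_zero strArr ""
    calc ([] : List Int) ++ List.map (fun x => PySem.Str.len (PySem.List.pyGetD strArr x ""))
            (PySem.List.pyRange 0 (PySem.List.len strArr))
        = List.map PySem.Str.len (List.map (fun j => PySem.List.pyGetD strArr j "")
            (PySem.List.pyRange 0 (PySem.List.len strArr))) := by
          simp [List.map_map, Function.comp_def]
      _ = lens := by rw [this]
  rw [hnum, PySem.List.foldl_append_singleton_eq_map]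
  simp only [List.nil_append]
  -- fl is the filtered lens
  have hfl' : fl = lens.filter (fun L => decide (L ≤ 30)) := by
    rw [hfl, hlens, List.filter_map]
    simp [Function.comp_def]
  -- members of fl are in [0, 30]
  have hfl_mem : ∀ k ∈ fl, 0 ≤ k ∧ k ≤ 30 := by
    intro k hk
    rw [hfl', List.mem_filter] at hk
    rcases hk with ⟨hk1, hk2⟩
    rw [hlens, List.mem_map] at hk1
    rcases hk1 with ⟨s, _, rfl⟩
    exact ⟨by rw [PySem.Str.len_eq]; positivity, by simpa using hk2⟩
  -- count in lens = count in fl for k ≤ 30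
  have hcnt : ∀ k : Int, k ≤ 30 → List.count k lens = List.count k fl := by
    intro k hk
    rw [hfl']
    exact (List.count_filter (by simpa using hk)).symm
  have hA0 : 0 ≤ PySem.List.maxD
      ((PySem.List.pyRange 0 31).map (fun k => (PySem.List.count lens k : Int))) (fun v => v) 0 := by
    apply pv_maxD_nonneg
    intro x hx
    rcases List.mem_map.mp hx with ⟨k, _, rfl⟩
    positivity
  apply le_antisymm
  · -- A's max ≤ bLoop fl 0
    rcases pv_maxD_cases ((PySem.List.pyRange 0 31).map (fun k => (PySem.List.count lens k : Int)))
      with h0 | hm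
    · rw [h0]; exact pv_bLoop_nonneg fl
    · rcases List.mem_map.mp hm with ⟨k, hk, hkeq⟩
      rw [← hkeq]
      rcases PySem.List.mem_pyRange_one.mp hk with ⟨hk0, hk31⟩
      rw [PySem.List.count_eq, hcnt k (by omega)]
      by_cases hkin : k ∈ fl
      · exact pv_count_le_bLoop fl 0 k hkin
      · rw [List.count_eq_zero_of_not_mem hkin]
        exact pv_bLoop_nonneg fl
  · -- bLoop fl 0 ≤ A's max
    rcases pv_bLoop_cases fl 0 with h0 | ⟨j, hj, hje⟩
    · rw [h0]; exact hA0
    · rw [hje]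
      rcases hfl_mem j hj with ⟨hj0, hj30⟩
      have hjr : j ∈ PySem.List.pyRange 0 31 := PySem.List.mem_pyRange_one.mpr ⟨hj0, by omega⟩
      have : ((List.count j fl : Nat) : Int) = (PySem.List.count lens j : Int) := by
        rw [PySem.List.count_eq, hcnt j hj30]
      rw [this]
      exact pv_le_maxD _ _ (List.mem_map.mpr ⟨j, hjr, rfl⟩)
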